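/- GENERATED by farm/mkstatement.py from design/units.tsv (unit `DGifGetImageHeader.4`) and the assertions of Gif/Spec/Seg_DGifGetImageHeader.lean — do not edit.
   THE STATEMENT of the proof unit `DGifGetImageHeader.4`: segment 4 of `DGifGetImageHeader` (24 instructions; entries 0x108ffe;
   exits 0x10902f,0x108f4e,0x108e78; ranges 0x108ffe-0x10902f,0x1090e3-0x109123)
   takes each of its entry assertions to one of its exit assertions (`Gif.Spec.DGifGetImageHeader.Seg4`), given the contracts of its callees.
   What the names mean: ProgX/Base/Spec/Basic.lean (the shared hypotheses), Gif/Spec/Seg_DGifGetImageHeader.lean (the assertions). The theorem to prove: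
   `theorem DGifGetImageHeader_4_ok : Gif.Spec.DGifGetImageHeader_4.Statement`. -/
import Gif.Code
import Gif.Dec.All
import Gif.Labels
import Gif.Spec.Alloc
import Gif.Spec.Reader
import Gif.Spec.Seg_DGifGetImageHeader
namespace Gif.Spec.DGifGetImageHeader_4
open X86 X86.User Asan

/-- The statement of unit `DGifGetImageHeader.4`. -/
def Statement : Prop :=
  ∀ (Lay : Layout) (_hLay : Lay.hi = 0x1000000) (μ : Microarch) (_hμ : UserX.MicroOK μ) (u₀ : State)
    (_hcode : HasCodeNat Lay u₀ Gif.L.DGifGetImageHeader.entry Gif.Code.code_DGifGetImageHeader.nat Gif.L.DGifGetImageHeader.size)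
    (_h_InternalRead : ∀ (H : Heap) (rest : List Obj) (frames : List (Nat × FrameLayout)) (F : Forest) (R : Rd) (n : Nat), Calls Lay μ ProgX.Base.WayInv (ProgX.Base.conv u₀) Gif.L.InternalRead.entry (Gif.Spec.InternalRead.spec H rest frames F R n))
    (_h_GifFreeMapObject : ∀ (H : Heap) (rest : List Obj) (frames : List (Nat × FrameLayout)) (colors n : Nat), Calls Lay μ ProgX.Base.WayInv (ProgX.Base.conv u₀) Gif.L.GifFreeMapObject.entry (Gif.Spec.GifFreeMapObject.spec H rest frames colors n))
    (_h_asan_load4_noabort : Asan.SmallCheck Lay μ ProgX.Base.WayInv (ProgX.Base.CodeOK u₀) [.rax, .rcx, .rdx] 4 ProgX.Base.L.__asan_load4_noabort.entry)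
    (_h_asan_load8_noabort : Asan.SmallCheck Lay μ ProgX.Base.WayInv (ProgX.Base.CodeOK u₀) [.rax, .rcx, .rdx] 8 ProgX.Base.L.__asan_load8_noabort.entry)
    (_h_asan_store4_noabort : Asan.SmallCheck Lay μ ProgX.Base.WayInv (ProgX.Base.CodeOK u₀) [.rax, .rcx, .rdx] 4 ProgX.Base.L.__asan_store4_noabort.entry)
    (_h_asan_store8_noabort : Asan.SmallCheck Lay μ ProgX.Base.WayInv (ProgX.Base.CodeOK u₀) [.rax, .rcx, .rdx] 8 ProgX.Base.L.__asan_store8_noabort.entry),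
    Gif.Spec.DGifGetImageHeader.Seg4 Lay μ u₀

end Gif.Spec.DGifGetImageHeader_4
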